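-- pv_equiv track=rewrite | github.com/killianmarty/Labo_IA | Labo2/PartieB/createur.py | couldMatch
-- ===== SOURCE A (Python) =====
-- def couldMatch(sentence, guess):
--
--     colors = [0, 0, 0, 0, 0, 0]
--     for i in range(4):
--         colors[sentence[0][i]] += 1
--
--     correct = 0
--     for i in range(4):
--         if(colors[guess[i]]!=0):
--             correct += 1
--             colors[guess[i]] -= 1
--
--
--     a = 0
--     for i in range(4):
--         if(correct != 0 and sentence[0][i] == guess[i]):
--             a += 1
--             correct -= 1
--
--     b = correct
--
--
--     return (a == sentence[1][0] and b >= sentence[1][1])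
-- ===== SOURCE B (Python) =====
-- def couldMatch(sentence, guess):
--     scount = [0, 0, 0, 0, 0, 0]
--     gcount = [0, 0, 0, 0, 0, 0]
--     for i in range(4):
--         scount[sentence[0][i]] += 1
--         gcount[guess[i]] += 1
--     black = sum(1 for i in range(4) if sentence[0][i] == guess[i])
--     total = sum(min(scount[k], gcount[k]) for k in range(6))
--     return black == sentence[1][0] and total - black >= sentence[1][1]
-- ===== Notes on version B (the rewrite author's own statement) =====
-- stated objective: simpler
-- what changed: A builds one mutable 6-slot count table, consumes it destructively with a guarded decrement loop to get the colour overlap and then carves the exact matches back out of the running count with a third guarded loop; B keeps no running state: it builds two static histograms, counts black pegs by direct positional comparison, and gets the colour overlap as the closed-form sum of min(scount[k], gcount[k]) over the six slots.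
-- outside the precondition, e.g. on couldMatch(([0, 1, 2, 3], [9]), [4, 4, 4, 4]): A returns False, B returns False
import Mathlib
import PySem

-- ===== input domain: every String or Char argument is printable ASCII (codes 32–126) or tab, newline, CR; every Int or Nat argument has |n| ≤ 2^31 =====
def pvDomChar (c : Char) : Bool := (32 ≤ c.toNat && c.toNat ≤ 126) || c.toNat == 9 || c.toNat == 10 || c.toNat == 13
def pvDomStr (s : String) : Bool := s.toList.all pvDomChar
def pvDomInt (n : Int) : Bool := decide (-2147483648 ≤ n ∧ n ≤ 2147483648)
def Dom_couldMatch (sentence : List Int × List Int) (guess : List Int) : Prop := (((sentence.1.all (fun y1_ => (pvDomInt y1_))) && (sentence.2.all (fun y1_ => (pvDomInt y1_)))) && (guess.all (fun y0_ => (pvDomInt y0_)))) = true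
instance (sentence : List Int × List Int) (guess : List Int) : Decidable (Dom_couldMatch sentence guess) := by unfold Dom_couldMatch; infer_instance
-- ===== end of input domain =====

-- B drops A's destructive decrement/carve-out loops: black pegs by direct positional comparison,
-- colour overlap as a closed-form sum of min(scount[k], gcount[k]) over two static histograms;
-- objective: simpler (same constant cost).

-- ===== PORT A =====
-- helper: the count-table building loop of A ('for i in range(4): colors[sentence[0][i]] += 1')
def pvBuildColors (secret : List Int) : List Int :=
  (PySem.List.pyRange 0 4 1).foldl
    (fun cs i =>
      PySem.List.pySetD cs (PySem.List.pyGetD secret i 0)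
        (PySem.List.pyGetD cs (PySem.List.pyGetD secret i 0) 0 + 1))
    [0, 0, 0, 0, 0, 0]

-- helper: A's second loop (counts colour overlap, decrementing the table)
def pvCorrectLoop (colors : List Int) (guess : List Int) : Int × List Int :=
  (PySem.List.pyRange 0 4 1).foldl
    (fun (st : Int × List Int) i =>
      let g := PySem.List.pyGetD guess i 0
      if PySem.List.pyGetD st.2 g 0 ≠ 0 then
        (st.1 + 1, PySem.List.pySetD st.2 g (PySem.List.pyGetD st.2 g 0 - 1))
      else st)
    (0, colors)

-- helper: A's third loop (carves exact matches out of 'correct' under the 'correct != 0' guard)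
def pvExactLoop (secret guess : List Int) (correct : Int) : Int × Int :=
  (PySem.List.pyRange 0 4 1).foldl
    (fun (p : Int × Int) i =>
      if p.2 ≠ 0 ∧ PySem.List.pyGetD secret i 0 = PySem.List.pyGetD guess i 0 then
        (p.1 + 1, p.2 - 1)
      else p)
    (0, correct)

def couldMatch (sentence : List Int × List Int) (guess : List Int) : Bool :=
  let colors := pvBuildColors sentence.1
  let correct := (pvCorrectLoop colors guess).1
  let ab := pvExactLoop sentence.1 guess correct
  let a := ab.1
  let b := ab.2
  a == PySem.List.pyGetD sentence.2 0 0 && decide (b ≥ PySem.List.pyGetD sentence.2 1 0)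

-- ===== PORT B =====
-- helper: Source B's single histogram loop updating scount and gcount together
def pvHists (secret guess : List Int) : List Int × List Int :=
  (PySem.List.pyRange 0 4 1).foldl
    (fun (p : List Int × List Int) i =>
      (PySem.List.pySetD p.1 (PySem.List.pyGetD secret i 0)
         (PySem.List.pyGetD p.1 (PySem.List.pyGetD secret i 0) 0 + 1),
       PySem.List.pySetD p.2 (PySem.List.pyGetD guess i 0)
         (PySem.List.pyGetD p.2 (PySem.List.pyGetD guess i 0) 0 + 1)))
    ([0, 0, 0, 0, 0, 0], [0, 0, 0, 0, 0, 0])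

def couldMatch_alt (sentence : List Int × List Int) (guess : List Int) : Bool :=
  let hists := pvHists sentence.1 guess
  let black := (PySem.List.pyRange 0 4 1).foldl
    (fun s i =>
      if PySem.List.pyGetD sentence.1 i 0 = PySem.List.pyGetD guess i 0 then s + 1 else s)
    (0 : Int)
  let total := (PySem.List.pyRange 0 6 1).foldl
    (fun s k => s + min (PySem.List.pyGetD hists.1 k 0) (PySem.List.pyGetD hists.2 k 0))
    (0 : Int)
  black == PySem.List.pyGetD sentence.2 0 0 &&
    decide (total - black ≥ PySem.List.pyGetD sentence.2 1 0)

-- ===== PRECONDITION & SPEC =====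
-- Pre_ excludes inputs where Python raises IndexError (short lists, a colour outside [-6,6) used
-- as an index into the 6-slot count lists).  It also requires sentence[1] to have ≥ 2 entries:
-- with exactly one entry both programs avoid the IndexError only when `and` short-circuits, a
-- condition on the computed peg count that a closed-form precondition cannot express (both
-- return False whenever they return at all there).
def Pre_couldMatch (sentence : List Int × List Int) (guess : List Int) : Prop :=
  4 ≤ sentence.1.length ∧ 4 ≤ guess.length ∧ 2 ≤ sentence.2.length ∧
  (∀ i < 4, -6 ≤ sentence.1.getD i 0 ∧ sentence.1.getD i 0 < 6) ∧
  (∀ i < 4, -6 ≤ guess.getD i 0 ∧ guess.getD i 0 < 6)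
instance (sentence : List Int × List Int) (guess : List Int) : Decidable (Pre_couldMatch sentence guess) := by unfold Pre_couldMatch; infer_instance

def pvWitness_couldMatch : (List Int × List Int) × List Int := (([0, 1, 2, 3], [2, 1]), [0, 2, 1, 5])

def Spec_couldMatch (sentence : List Int × List Int) (guess : List Int) (out : Bool) : Prop := out = couldMatch_alt sentence guess
instance (sentence : List Int × List Int) (guess : List Int) (out : Bool) : Decidable (Spec_couldMatch sentence guess out) := by unfold Spec_couldMatch; infer_instance

-- ===== CLAIM (what is proved, stated in full; the proofs are below) =====
def Claim_equal_couldMatch : Prop := ∀ (sentence : List Int × List Int) (guess : List Int), Dom_couldMatch sentence guess → Pre_couldMatch sentence guess → Spec_couldMatch sentence guess (couldMatch sentence guess)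

-- ===== LEMMAS AND PROOFS =====

-- canonical slot of a colour c ∈ [-6,6) in the 6-element count list (Python negative indexing)
def normIdx (c : Int) : Nat := (if c < 0 then c + 6 else c).toNat

-- abstract single steps of the histogram-building / decrement loops, over canonical Nat slots
def step1 (cs : List Int) (a : Nat) : List Int := cs.set a (cs.getD a 0 + 1)
def step2 (p : Int × List Int) (g : Nat) : Int × List Int :=
  if p.2.getD g 0 ≠ 0 then (p.1 + 1, p.2.set g (p.2.getD g 0 - 1)) else p

-- total colour overlap between a count table and a guess list, per colour
def mu (cs : List Int) (gs : List Nat) : Int :=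
  ∑ k ∈ Finset.range 6, min (cs.getD k 0) ((gs.count k : Int))

lemma normIdx_lt (c : Int) (h1 : -6 ≤ c) (h2 : c < 6) : normIdx c < 6 := by
  unfold normIdx; split <;> omega

lemma getD_set_eq (cs : List Int) (n k : Nat) (v : Int) (hn : n < cs.length) :
    (cs.set n v).getD k 0 = if n = k then v else cs.getD k 0 := by
  simp only [List.getD_eq_getElem?_getD, List.getElem?_set]
  split
  · simp [hn, *]
  · rfl

lemma pyGetD_norm (cs : List Int) (h6 : cs.length = 6) (c d : Int)
    (h1 : -6 ≤ c) (h2 : c < 6) :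
    PySem.List.pyGetD cs c d = cs.getD (normIdx c) d := by
  rcases le_or_gt 0 c with hc | hc
  · rw [PySem.List.pyGetD_eq_getElem cs (i := c) d hc (by omega)]
    have hn : normIdx c = c.toNat := by unfold normIdx; rw [if_neg (by omega)]
    rw [hn, List.getD_eq_getElem cs d (by omega)]
  · have hk : c = -(((-c).toNat : Nat) : Int) := by omega
    rw [hk, PySem.List.pyGetD_neg_natCast cs (-c).toNat d (by omega) (by omega)]
    have hn : normIdx (-(((-c).toNat : Nat) : Int)) = cs.length - (-c).toNat := by
      unfold normIdx; rw [if_pos (by omega)]; omega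
    rw [hn, List.getD_eq_getElem cs d (by omega)]

lemma pySetD_norm (cs : List Int) (h6 : cs.length = 6) (c : Int) (v : Int)
    (h1 : -6 ≤ c) (h2 : c < 6) :
    PySem.List.pySetD cs c v = cs.set (normIdx c) v := by
  rcases le_or_gt 0 c with hc | hc
  · rw [PySem.List.pySetD_of_nonneg cs (i := c) v hc]
    have hn : normIdx c = c.toNat := by unfold normIdx; rw [if_neg (by omega)]
    rw [hn]
  · have hk : c = -(((-c).toNat : Nat) : Int) := by omega
    have hn : normIdx c = cs.length - (-c).toNat := by
      unfold normIdx; rw [if_pos (by omega)]; omega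
    rw [hn]
    conv_lhs => rw [hk]
    simp only [PySem.List.pySetD, PySem.List.pySet?, PySem.List.pyIdx?]
    rw [if_neg (by omega), if_pos (by omega)]
    simp only [Option.map_some, Option.getD_some]
    congr 2
    omega

lemma bridge1 (cs : List Int) (h6 : cs.length = 6) (c : Int) (h1 : -6 ≤ c) (h2 : c < 6) :
    PySem.List.pySetD cs c (PySem.List.pyGetD cs c 0 + 1) = step1 cs (normIdx c) := by
  rw [pyGetD_norm cs h6 c 0 h1 h2, pySetD_norm cs h6 c _ h1 h2]; rfl

lemma bridge2 (p : Int × List Int) (h6 : p.2.length = 6) (g : Int) (h1 : -6 ≤ g) (h2 : g < 6) :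
    (if PySem.List.pyGetD p.2 g 0 ≠ 0 then
        (p.1 + 1, PySem.List.pySetD p.2 g (PySem.List.pyGetD p.2 g 0 - 1))
      else p) = step2 p (normIdx g) := by
  rw [pyGetD_norm p.2 h6 g 0 h1 h2, pySetD_norm p.2 h6 g _ h1 h2]; rfl

lemma length_step1 (cs : List Int) (a : Nat) : (step1 cs a).length = cs.length := by
  simp [step1]

lemma length_step2 (p : Int × List Int) (g : Nat) : (step2 p g).2.length = p.2.length := by
  unfold step2; split <;> simp

lemma foldl_step1_getD (as : List Nat) :
    ∀ (cs : List Int), (∀ a ∈ as, a < cs.length) → ∀ k,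
      (as.foldl step1 cs).getD k 0 = cs.getD k 0 + as.count k := by
  induction as with
  | nil => intro cs _ k; simp
  | cons a as ih =>
    intro cs h k
    have ha : a < cs.length := h a (by simp)
    rw [List.foldl_cons, ih (step1 cs a) (by intro x hx; rw [length_step1]; exact h x (by simp [hx])) k]
    rw [step1, getD_set_eq cs a k _ ha, List.count_cons]
    split <;> simp_all <;> omega

lemma foldl_step2_fst (gs : List Nat) :
    ∀ (t : Int) (cs : List Int), cs.length = 6 → (∀ k, 0 ≤ cs.getD k 0) →
      (∀ g ∈ gs, g < 6) →
      (gs.foldl step2 (t, cs)).1 = t + mu cs gs := by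
  induction gs with
  | nil =>
    intro t cs _ hnn _
    have h0 : mu cs [] = 0 := by
      unfold mu
      apply Finset.sum_eq_zero
      intro k _
      have := hnn k
      simp only [List.count_nil, Nat.cast_zero]
      omega
    rw [List.foldl_nil, h0]
    simp
  | cons g gs ih =>
    intro t cs h6 hnn hlt
    have hg6 : g < 6 := hlt g (by simp)
    have hglen : g < cs.length := by omega
    rw [List.foldl_cons]
    by_cases hz : cs.getD g 0 ≠ 0
    · have hpos : 0 < cs.getD g 0 := lt_of_le_of_ne (hnn g) (Ne.symm hz)
      have hstep : step2 (t, cs) g = (t + 1, cs.set g (cs.getD g 0 - 1)) := by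
        unfold step2; rw [if_pos hz]
      rw [hstep, ih (t + 1) _ (by rw [List.length_set]; exact h6)
        (by intro k; rw [getD_set_eq cs g k _ hglen]; split
            · omega
            · exact hnn k)
        (by intro x hx; exact hlt x (by simp [hx]))]
      have hmu : mu cs (g :: gs) = 1 + mu (cs.set g (cs.getD g 0 - 1)) gs := by
        unfold mu
        have hterm : ∀ k ∈ Finset.range 6,
            min (cs.getD k 0) (((g :: gs).count k : Int)) =
              (if k = g then 1 else 0) +
                min ((cs.set g (cs.getD g 0 - 1)).getD k 0) ((gs.count k : Int)) := by
          intro k hk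
          rw [getD_set_eq cs g k _ hglen, List.count_cons]
          by_cases hkg : k = g
          · subst hkg
            simp only [if_pos rfl, beq_self_eq_true, if_true]
            push_cast
            omega
          · have hgk : (g == k) = false := by simp [Ne.symm hkg]
            simp only [if_neg (Ne.symm hkg), if_neg hkg, hgk, Bool.false_eq_true, if_false,
              Nat.add_zero]
            omega
        rw [Finset.sum_congr rfl hterm, Finset.sum_add_distrib,
          Finset.sum_ite_eq' (Finset.range 6) g (fun _ => (1 : Int))]
        simp [hg6]
      omega
    · have hstep : step2 (t, cs) g = (t, cs) := by
        unfold step2; rw [if_neg hz]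
      rw [hstep, ih t cs h6 hnn (by intro x hx; exact hlt x (by simp [hx]))]
      have hz0 : cs.getD g 0 = 0 := by omega
      have hmu : mu cs (g :: gs) = mu cs gs := by
        unfold mu
        apply Finset.sum_congr rfl
        intro k hk
        rw [List.count_cons]
        by_cases hkg : k = g
        · subst hkg
          simp only [beq_self_eq_true, if_true, hz0]
          push_cast
          omega
        · have hgk : (g == k) = false := by simp [Ne.symm hkg]
          simp only [hgk, Bool.false_eq_true, if_false, Nat.add_zero]
      omega

lemma exact_le_minsum (l : List (Nat × Nat)) (h : ∀ p ∈ l, p.1 < 6 ∧ p.2 < 6) :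
    ((l.countP (fun p => p.1 == p.2) : Nat) : Int) ≤
      ∑ k ∈ Finset.range 6,
        min (((l.map Prod.fst).count k : Nat) : Int) (((l.map Prod.snd).count k : Nat) : Int) := by
  induction l with
  | nil => simp
  | cons p l ih =>
    have hp := h p (by simp)
    have ihl := ih (fun q hq => h q (by simp [hq]))
    have hterm : ∀ k ∈ Finset.range 6,
        (if p.1 = p.2 ∧ p.1 = k then (1 : Int) else 0) +
          min (((l.map Prod.fst).count k : Nat) : Int) (((l.map Prod.snd).count k : Nat) : Int)
        ≤ min ((((p :: l).map Prod.fst).count k : Nat) : Int) ((((p :: l).map Prod.snd).count k : Nat) : Int) := by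
      intro k hk
      simp only [List.map_cons, List.count_cons]
      by_cases h1 : p.1 = k <;> by_cases h2 : p.2 = k <;>
        by_cases h12 : p.1 = p.2 <;> simp [h1, h2, h12] <;> push_cast <;> omega <;> simp_all
    have hdelta : ∑ k ∈ Finset.range 6, (if p.1 = p.2 ∧ p.1 = k then (1 : Int) else 0) =
        (if p.1 = p.2 then 1 else 0) := by
      have hshape : ∀ k ∈ Finset.range 6, (if p.1 = p.2 ∧ p.1 = k then (1 : Int) else 0) =
          if k = p.1 then (if p.1 = p.2 then (1 : Int) else 0) else 0 := by
        intro k _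
        by_cases h12 : p.1 = p.2 <;> by_cases hb : p.1 = k <;> simp_all <;> omega
      rw [Finset.sum_congr rfl hshape,
        Finset.sum_ite_eq' (Finset.range 6) p.1 (fun _ => if p.1 = p.2 then (1 : Int) else 0)]
      simp [hp.1]
    have hsum : (if p.1 = p.2 then (1 : Int) else 0) +
        ∑ k ∈ Finset.range 6,
          min (((l.map Prod.fst).count k : Nat) : Int) (((l.map Prod.snd).count k : Nat) : Int)
        ≤ ∑ k ∈ Finset.range 6,
          min ((((p :: l).map Prod.fst).count k : Nat) : Int) ((((p :: l).map Prod.snd).count k : Nat) : Int) := by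
      rw [← hdelta, ← Finset.sum_add_distrib]
      exact Finset.sum_le_sum hterm
    rw [List.countP_cons]
    by_cases h12 : p.1 = p.2
    · have e1 : (if (p.1 == p.2) = true then (1 : Nat) else 0) = 1 := by simp [h12]
      have e2 : (if p.1 = p.2 then (1 : Int) else 0) = 1 := by simp [h12]
      rw [e1]
      rw [e2] at hsum
      push_cast
      omega
    · have e1 : (if (p.1 == p.2) = true then (1 : Nat) else 0) = 0 := by simp [h12]
      have e2 : (if p.1 = p.2 then (1 : Int) else 0) = 0 := by simp [h12]
      rw [e1]
      rw [e2] at hsum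
      push_cast
      omega

lemma zeros_getD (k : Nat) : ([0, 0, 0, 0, 0, 0] : List Int).getD k 0 = 0 := by
  rcases k with _|_|_|_|_|_|k <;> rfl

lemma step1_len6 (cs : List Int) (h : cs.length = 6) (a : Nat) : (step1 cs a).length = 6 := by
  rw [length_step1, h]

lemma step2_len6 (p : Int × List Int) (h : p.2.length = 6) (g : Nat) :
    (step2 p g).2.length = 6 := by
  rw [length_step2, h]

lemma if_eq_le_norm (c g : Int) :
    (if c = g then (1 : Int) else 0) ≤ (if (normIdx c == normIdx g) = true then (1 : Int) else 0) := by
  by_cases h : c = g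
  · subst h; simp
  · rw [if_neg h]; split <;> omega

lemma buildColors_eq (s : List Int)
    (h0 : -6 ≤ s.getD 0 0 ∧ s.getD 0 0 < 6) (h1 : -6 ≤ s.getD 1 0 ∧ s.getD 1 0 < 6)
    (h2 : -6 ≤ s.getD 2 0 ∧ s.getD 2 0 < 6) (h3 : -6 ≤ s.getD 3 0 ∧ s.getD 3 0 < 6) :
    pvBuildColors s =
      step1 (step1 (step1 (step1 [0, 0, 0, 0, 0, 0] (normIdx (s.getD 0 0))) (normIdx (s.getD 1 0)))
        (normIdx (s.getD 2 0))) (normIdx (s.getD 3 0)) := by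
  have hZ : (([0, 0, 0, 0, 0, 0] : List Int)).length = 6 := rfl
  unfold pvBuildColors
  rw [show PySem.List.pyRange 0 4 1 = ([0, 1, 2, 3] : List Int) from by decide]
  simp only [List.foldl_cons, List.foldl_nil, PySem.List.pyGetD_ofNat']
  rw [bridge1 _ hZ _ h0.1 h0.2]
  rw [bridge1 _ (step1_len6 _ hZ _) _ h1.1 h1.2]
  rw [bridge1 _ (step1_len6 _ (step1_len6 _ hZ _) _) _ h2.1 h2.2]
  rw [bridge1 _ (step1_len6 _ (step1_len6 _ (step1_len6 _ hZ _) _) _) _ h3.1 h3.2]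

-- Source B's joint histogram loop splits into the two independent step1 chains
lemma hists_eq (s g : List Int)
    (hs0 : -6 ≤ s.getD 0 0 ∧ s.getD 0 0 < 6) (hs1 : -6 ≤ s.getD 1 0 ∧ s.getD 1 0 < 6)
    (hs2 : -6 ≤ s.getD 2 0 ∧ s.getD 2 0 < 6) (hs3 : -6 ≤ s.getD 3 0 ∧ s.getD 3 0 < 6)
    (hg0 : -6 ≤ g.getD 0 0 ∧ g.getD 0 0 < 6) (hg1 : -6 ≤ g.getD 1 0 ∧ g.getD 1 0 < 6)
    (hg2 : -6 ≤ g.getD 2 0 ∧ g.getD 2 0 < 6) (hg3 : -6 ≤ g.getD 3 0 ∧ g.getD 3 0 < 6) :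
    pvHists s g =
      (step1 (step1 (step1 (step1 [0, 0, 0, 0, 0, 0] (normIdx (s.getD 0 0))) (normIdx (s.getD 1 0)))
         (normIdx (s.getD 2 0))) (normIdx (s.getD 3 0)),
       step1 (step1 (step1 (step1 [0, 0, 0, 0, 0, 0] (normIdx (g.getD 0 0))) (normIdx (g.getD 1 0)))
         (normIdx (g.getD 2 0))) (normIdx (g.getD 3 0))) := by
  have hZ : (([0, 0, 0, 0, 0, 0] : List Int)).length = 6 := rfl
  unfold pvHists
  rw [show PySem.List.pyRange 0 4 1 = ([0, 1, 2, 3] : List Int) from by decide]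
  simp only [List.foldl_cons, List.foldl_nil, PySem.List.pyGetD_ofNat']
  rw [bridge1 _ hZ _ hs0.1 hs0.2, bridge1 _ hZ _ hg0.1 hg0.2]
  rw [bridge1 _ (step1_len6 _ hZ _) _ hs1.1 hs1.2, bridge1 _ (step1_len6 _ hZ _) _ hg1.1 hg1.2]
  rw [bridge1 _ (step1_len6 _ (step1_len6 _ hZ _) _) _ hs2.1 hs2.2,
      bridge1 _ (step1_len6 _ (step1_len6 _ hZ _) _) _ hg2.1 hg2.2]
  rw [bridge1 _ (step1_len6 _ (step1_len6 _ (step1_len6 _ hZ _) _) _) _ hs3.1 hs3.2,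
      bridge1 _ (step1_len6 _ (step1_len6 _ (step1_len6 _ hZ _) _) _) _ hg3.1 hg3.2]

lemma correctLoop_eq (cs : List Int) (g : List Int) (h6 : cs.length = 6)
    (h0 : -6 ≤ g.getD 0 0 ∧ g.getD 0 0 < 6) (h1 : -6 ≤ g.getD 1 0 ∧ g.getD 1 0 < 6)
    (h2 : -6 ≤ g.getD 2 0 ∧ g.getD 2 0 < 6) (h3 : -6 ≤ g.getD 3 0 ∧ g.getD 3 0 < 6) :
    pvCorrectLoop cs g =
      step2 (step2 (step2 (step2 (0, cs) (normIdx (g.getD 0 0))) (normIdx (g.getD 1 0)))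
        (normIdx (g.getD 2 0))) (normIdx (g.getD 3 0)) := by
  unfold pvCorrectLoop
  rw [show PySem.List.pyRange 0 4 1 = ([0, 1, 2, 3] : List Int) from by decide]
  simp only [List.foldl_cons, List.foldl_nil, PySem.List.pyGetD_ofNat']
  rw [bridge2 (0, cs) h6 _ h0.1 h0.2]
  rw [bridge2 _ (step2_len6 _ h6 _) _ h1.1 h1.2]
  rw [bridge2 _ (step2_len6 _ (step2_len6 _ h6 _) _) _ h2.1 h2.2]
  rw [bridge2 _ (step2_len6 _ (step2_len6 _ (step2_len6 _ h6 _) _) _) _ h3.1 h3.2]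

-- abstract single step of A's third loop ('if correct != 0 and secret[i] == guess[i]')
def step3 (p : Int × Int) (e : Bool) : Int × Int :=
  if p.2 ≠ 0 ∧ e = true then (p.1 + 1, p.2 - 1) else p

lemma foldl_step3 (es : List Bool) :
    ∀ (a c : Int), ((es.count true : Nat) : Int) ≤ c →
      es.foldl step3 (a, c) =
        (a + ((es.count true : Nat) : Int), c - ((es.count true : Nat) : Int)) := by
  induction es with
  | nil => intro a c _; simp
  | cons e es ih =>
    intro a c h
    cases e
    · have hcf : (false :: es).count true = es.count true := by simp
      rw [List.foldl_cons, show step3 (a, c) false = (a, c) from by simp [step3]]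
      rw [ih a c (by rw [hcf] at h; exact h), hcf]
    · have hct : (true :: es).count true = es.count true + 1 := by simp
      have h' : ((es.count true : Nat) : Int) ≤ c - 1 := by
        rw [hct] at h; push_cast at h ⊢; omega
      have hne : c ≠ 0 := by rw [hct] at h; push_cast at h; omega
      rw [List.foldl_cons, show step3 (a, c) true = (a + 1, c - 1) from by simp [step3, hne]]
      rw [ih (a + 1) (c - 1) h', hct]
      simp only [Prod.ext_iff]
      push_cast
      constructor <;> ring

lemma ifsum_count (d0 d1 d2 d3 : Bool) :
    (((if d0 = true then (1 : Int) else 0) + (if d1 = true then 1 else 0)) +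
      (if d2 = true then 1 else 0)) + (if d3 = true then 1 else 0) =
      (([d0, d1, d2, d3].count true : Nat) : Int) := by
  cases d0 <;> cases d1 <;> cases d2 <;> cases d3 <;> decide

lemma exactLoop_eq (s g : List Int) (T B : Int)
    (hB : B = (((if s.getD 0 0 = g.getD 0 0 then (1 : Int) else 0) +
        (if s.getD 1 0 = g.getD 1 0 then 1 else 0)) +
        (if s.getD 2 0 = g.getD 2 0 then 1 else 0)) +
        (if s.getD 3 0 = g.getD 3 0 then 1 else 0))
    (hBT : B ≤ T) :
    pvExactLoop s g T = (B, T - B) := by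
  unfold pvExactLoop
  rw [show PySem.List.pyRange 0 4 1 = ([0, 1, 2, 3] : List Int) from by decide]
  simp only [List.foldl_cons, List.foldl_nil, PySem.List.pyGetD_ofNat']
  have hb : ∀ (p : Int × Int) (x y : Int),
      (if p.2 ≠ 0 ∧ x = y then (p.1 + 1, p.2 - 1) else p) = step3 p (decide (x = y)) := by
    intro p x y; by_cases h : x = y <;> simp [step3, h]
  simp only [hb]
  rw [show (if T ≠ 0 ∧ s.getD 0 0 = g.getD 0 0 then ((0 : Int) + 1, T - 1) else ((0 : Int), T)) =
      step3 (0, T) (decide (s.getD 0 0 = g.getD 0 0)) from by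
    by_cases h : s.getD 0 0 = g.getD 0 0 <;> simp [step3, h]]
  have hsum : B = (([decide (s.getD 0 0 = g.getD 0 0), decide (s.getD 1 0 = g.getD 1 0),
      decide (s.getD 2 0 = g.getD 2 0), decide (s.getD 3 0 = g.getD 3 0)].count true : Nat) : Int) := by
    rw [hB, ← ifsum_count (decide (s.getD 0 0 = g.getD 0 0)) (decide (s.getD 1 0 = g.getD 1 0))
      (decide (s.getD 2 0 = g.getD 2 0)) (decide (s.getD 3 0 = g.getD 3 0))]
    simp
  have hfold := foldl_step3 [decide (s.getD 0 0 = g.getD 0 0), decide (s.getD 1 0 = g.getD 1 0),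
      decide (s.getD 2 0 = g.getD 2 0), decide (s.getD 3 0 = g.getD 3 0)] 0 T (by rw [← hsum]; exact hBT)
  simp only [List.foldl_cons, List.foldl_nil] at hfold
  rw [hfold, ← hsum, zero_add]

-- ===== VERDICT (by name: the statement is the Claim_ definition above) =====
set_option maxHeartbeats 3200000 in
theorem couldMatch_spec : Claim_equal_couldMatch := by
  intro sentence guess _ hpre
  obtain ⟨hs1, hg, hs2, hcs, hgs⟩ := hpre
  have hc0 := hcs 0 (by omega)
  have hc1 := hcs 1 (by omega)
  have hc2 := hcs 2 (by omega)
  have hc3 := hcs 3 (by omega)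
  have hg0 := hgs 0 (by omega)
  have hg1 := hgs 1 (by omega)
  have hg2 := hgs 2 (by omega)
  have hg3 := hgs 3 (by omega)
  unfold Spec_couldMatch
  simp only [couldMatch, couldMatch_alt]
  rw [buildColors_eq sentence.1 hc0 hc1 hc2 hc3]
  set CNT := step1 (step1 (step1 (step1 [0, 0, 0, 0, 0, 0] (normIdx (sentence.1.getD 0 0)))
    (normIdx (sentence.1.getD 1 0))) (normIdx (sentence.1.getD 2 0)))
    (normIdx (sentence.1.getD 3 0)) with hCNT
  have hZ : (([0, 0, 0, 0, 0, 0] : List Int)).length = 6 := rfl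
  have hCNT6 : CNT.length = 6 := by
    rw [hCNT]; exact step1_len6 _ (step1_len6 _ (step1_len6 _ (step1_len6 _ hZ _) _) _) _
  rw [correctLoop_eq CNT guess hCNT6 hg0 hg1 hg2 hg3]
  -- count-table characterisation
  have hcount : ∀ k, CNT.getD k 0 =
      (([normIdx (sentence.1.getD 0 0), normIdx (sentence.1.getD 1 0),
         normIdx (sentence.1.getD 2 0), normIdx (sentence.1.getD 3 0)].count k : Nat) : Int) := by
    intro k
    have := foldl_step1_getD [normIdx (sentence.1.getD 0 0), normIdx (sentence.1.getD 1 0),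
        normIdx (sentence.1.getD 2 0), normIdx (sentence.1.getD 3 0)]
      ([0, 0, 0, 0, 0, 0] : List Int)
      (by intro a ha; rw [hZ]
          simp only [List.mem_cons, List.not_mem_nil, or_false] at ha
          rcases ha with h | h | h | h
          · rw [h]; exact normIdx_lt _ hc0.1 hc0.2
          · rw [h]; exact normIdx_lt _ hc1.1 hc1.2
          · rw [h]; exact normIdx_lt _ hc2.1 hc2.2
          · rw [h]; exact normIdx_lt _ hc3.1 hc3.2) k
    simp only [List.foldl_cons, List.foldl_nil] at this
    rw [hCNT, this, zeros_getD, zero_add]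
  have hnn : ∀ k, 0 ≤ CNT.getD k 0 := by intro k; rw [hcount k]; positivity
  set ST := step2 (step2 (step2 (step2 (0, CNT) (normIdx (guess.getD 0 0)))
    (normIdx (guess.getD 1 0))) (normIdx (guess.getD 2 0))) (normIdx (guess.getD 3 0)) with hST
  -- total-overlap characterisation of A's running count
  have hTmu : ST.1 = mu CNT [normIdx (guess.getD 0 0), normIdx (guess.getD 1 0),
      normIdx (guess.getD 2 0), normIdx (guess.getD 3 0)] := by
    have := foldl_step2_fst [normIdx (guess.getD 0 0), normIdx (guess.getD 1 0),
        normIdx (guess.getD 2 0), normIdx (guess.getD 3 0)] 0 CNT hCNT6 hnn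
      (by intro x hx
          simp only [List.mem_cons, List.not_mem_nil, or_false] at hx
          rcases hx with h | h | h | h
          · rw [h]; exact normIdx_lt _ hg0.1 hg0.2
          · rw [h]; exact normIdx_lt _ hg1.1 hg1.2
          · rw [h]; exact normIdx_lt _ hg2.1 hg2.2
          · rw [h]; exact normIdx_lt _ hg3.1 hg3.2)
    simp only [List.foldl_cons, List.foldl_nil] at this
    rw [hST, this, zero_add]
  -- black <= total (needed by A's third loop characterisation)
  have hBT : (((if sentence.1.getD 0 0 = guess.getD 0 0 then (1 : Int) else 0) +
        (if sentence.1.getD 1 0 = guess.getD 1 0 then 1 else 0)) +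
        (if sentence.1.getD 2 0 = guess.getD 2 0 then 1 else 0)) +
        (if sentence.1.getD 3 0 = guess.getD 3 0 then 1 else 0) ≤ ST.1 := by
    rw [hTmu]
    have hle := exact_le_minsum
      [(normIdx (sentence.1.getD 0 0), normIdx (guess.getD 0 0)),
       (normIdx (sentence.1.getD 1 0), normIdx (guess.getD 1 0)),
       (normIdx (sentence.1.getD 2 0), normIdx (guess.getD 2 0)),
       (normIdx (sentence.1.getD 3 0), normIdx (guess.getD 3 0))]
      (by intro p hp
          simp only [List.mem_cons, List.not_mem_nil, or_false] at hp
          rcases hp with h | h | h | h <;> subst h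
          · exact ⟨normIdx_lt _ hc0.1 hc0.2, normIdx_lt _ hg0.1 hg0.2⟩
          · exact ⟨normIdx_lt _ hc1.1 hc1.2, normIdx_lt _ hg1.1 hg1.2⟩
          · exact ⟨normIdx_lt _ hc2.1 hc2.2, normIdx_lt _ hg2.1 hg2.2⟩
          · exact ⟨normIdx_lt _ hc3.1 hc3.2, normIdx_lt _ hg3.1 hg3.2⟩)
    have hcp : (((if sentence.1.getD 0 0 = guess.getD 0 0 then (1 : Int) else 0) +
          (if sentence.1.getD 1 0 = guess.getD 1 0 then 1 else 0)) +
          (if sentence.1.getD 2 0 = guess.getD 2 0 then 1 else 0)) +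
          (if sentence.1.getD 3 0 = guess.getD 3 0 then 1 else 0) ≤
        (([(normIdx (sentence.1.getD 0 0), normIdx (guess.getD 0 0)),
           (normIdx (sentence.1.getD 1 0), normIdx (guess.getD 1 0)),
           (normIdx (sentence.1.getD 2 0), normIdx (guess.getD 2 0)),
           (normIdx (sentence.1.getD 3 0), normIdx (guess.getD 3 0))].countP
            (fun p => p.1 == p.2) : Nat) : Int) := by
      simp only [List.countP_cons, List.countP_nil]
      have i0 := if_eq_le_norm (sentence.1.getD 0 0) (guess.getD 0 0)
      have i1 := if_eq_le_norm (sentence.1.getD 1 0) (guess.getD 1 0)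
      have i2 := if_eq_le_norm (sentence.1.getD 2 0) (guess.getD 2 0)
      have i3 := if_eq_le_norm (sentence.1.getD 3 0) (guess.getD 3 0)
      push_cast
      omega
    have hmu_eq : mu CNT [normIdx (guess.getD 0 0), normIdx (guess.getD 1 0),
        normIdx (guess.getD 2 0), normIdx (guess.getD 3 0)] =
        ∑ k ∈ Finset.range 6,
          min ((([(normIdx (sentence.1.getD 0 0), normIdx (guess.getD 0 0)),
              (normIdx (sentence.1.getD 1 0), normIdx (guess.getD 1 0)),
              (normIdx (sentence.1.getD 2 0), normIdx (guess.getD 2 0)),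
              (normIdx (sentence.1.getD 3 0), normIdx (guess.getD 3 0))].map Prod.fst).count k : Nat) : Int)
            ((([(normIdx (sentence.1.getD 0 0), normIdx (guess.getD 0 0)),
              (normIdx (sentence.1.getD 1 0), normIdx (guess.getD 1 0)),
              (normIdx (sentence.1.getD 2 0), normIdx (guess.getD 2 0)),
              (normIdx (sentence.1.getD 3 0), normIdx (guess.getD 3 0))].map Prod.snd).count k : Nat) : Int) := by
      unfold mu
      apply Finset.sum_congr rfl
      intro k _
      rw [hcount k]
      congr 2 <;> simp
    rw [hmu_eq]
    exact le_trans hcp hle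
  rw [exactLoop_eq sentence.1 guess ST.1 _ rfl hBT]
  -- ----- B side -----
  rw [hists_eq sentence.1 guess hc0 hc1 hc2 hc3 hg0 hg1 hg2 hg3, ← hCNT]
  set GNT := step1 (step1 (step1 (step1 [0, 0, 0, 0, 0, 0] (normIdx (guess.getD 0 0)))
    (normIdx (guess.getD 1 0))) (normIdx (guess.getD 2 0)))
    (normIdx (guess.getD 3 0)) with hGNT
  have hcountG : ∀ k, GNT.getD k 0 =
      (([normIdx (guess.getD 0 0), normIdx (guess.getD 1 0),
         normIdx (guess.getD 2 0), normIdx (guess.getD 3 0)].count k : Nat) : Int) := by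
    intro k
    have := foldl_step1_getD [normIdx (guess.getD 0 0), normIdx (guess.getD 1 0),
        normIdx (guess.getD 2 0), normIdx (guess.getD 3 0)]
      ([0, 0, 0, 0, 0, 0] : List Int)
      (by intro a ha; rw [hZ]
          simp only [List.mem_cons, List.not_mem_nil, or_false] at ha
          rcases ha with h | h | h | h
          · rw [h]; exact normIdx_lt _ hg0.1 hg0.2
          · rw [h]; exact normIdx_lt _ hg1.1 hg1.2
          · rw [h]; exact normIdx_lt _ hg2.1 hg2.2
          · rw [h]; exact normIdx_lt _ hg3.1 hg3.2) k
    simp only [List.foldl_cons, List.foldl_nil] at this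
    rw [hGNT, this, zeros_getD, zero_add]
  rw [show PySem.List.pyRange 0 4 1 = ([0, 1, 2, 3] : List Int) from by decide,
      show PySem.List.pyRange 0 6 1 = ([0, 1, 2, 3, 4, 5] : List Int) from by decide]
  simp only [List.foldl_cons, List.foldl_nil, PySem.List.pyGetD_ofNat']
  congr 1
  · congr 1
    split_ifs <;> omega
  · rw [decide_eq_decide]
    rw [hTmu]
    unfold mu
    simp only [Finset.sum_range_succ, Finset.sum_range_zero]
    rw [hcount 0, hcount 1, hcount 2, hcount 3, hcount 4, hcount 5,
        hcountG 0, hcountG 1, hcountG 2, hcountG 3, hcountG 4, hcountG 5]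
    split_ifs <;> omega
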